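-- pv_equiv track=rewrite | github.com/AliyevH/mad-migration | madmigration/fullmigration/postgresql_full_migration.py | __generata_table_structure
-- ===== SOURCE A (Python) =====
-- def __generata_table_structure(foreign_table):
--     counter = 0
--     column_data = ""
--     __foreign_table = {}
--
--     for columns in foreign_table:
--         foreign_table_name, schema_name, column_name, column_type, ord_number = columns
--
--         if ord_number == 1 and counter > 0:
--             column_data = column_data.strip(',')
--             __foreign_table['column_data'] = column_data
--             column_data = ""
--             return __foreign_table
--
--         __foreign_table['foreign_table_name'] = foreign_table_name
--         __foreign_table['schema_name'] = schema_name
--         column_data += column_name + ' ' + column_type + ','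
--
--         counter += 1
--     else:
--         column_data = column_data.strip(',')
--         __foreign_table['column_data'] = column_data
--         return __foreign_table
-- ===== SOURCE B (Python) =====
-- def __generata_table_structure(foreign_table):
--     rows = list(foreign_table)
--     cutoff = next((i for i, r in enumerate(rows) if i > 0 and r[4] == 1), len(rows))
--     group = rows[:cutoff]
--     if not group:
--         return {'column_data': ''}
--     result = {
--         'foreign_table_name': group[-1][0],
--         'schema_name': group[-1][1],
--     }
--     result['column_data'] = ','.join(f"{r[2]} {r[3]}" for r in group).strip(',')
--     return result
-- ===== Notes on version B (the rewrite author's own statement) =====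
-- stated objective: simpler
-- what changed: B replaces A's stateful single loop (counter, growing comma-terminated string, mutated dict with a mid-loop early return) by a compute-the-cutoff-first decomposition: find the first index i>=1 with ord_number==1, slice the group, read the metadata from the group's last row and build column_data with ','.join.
import Mathlib
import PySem

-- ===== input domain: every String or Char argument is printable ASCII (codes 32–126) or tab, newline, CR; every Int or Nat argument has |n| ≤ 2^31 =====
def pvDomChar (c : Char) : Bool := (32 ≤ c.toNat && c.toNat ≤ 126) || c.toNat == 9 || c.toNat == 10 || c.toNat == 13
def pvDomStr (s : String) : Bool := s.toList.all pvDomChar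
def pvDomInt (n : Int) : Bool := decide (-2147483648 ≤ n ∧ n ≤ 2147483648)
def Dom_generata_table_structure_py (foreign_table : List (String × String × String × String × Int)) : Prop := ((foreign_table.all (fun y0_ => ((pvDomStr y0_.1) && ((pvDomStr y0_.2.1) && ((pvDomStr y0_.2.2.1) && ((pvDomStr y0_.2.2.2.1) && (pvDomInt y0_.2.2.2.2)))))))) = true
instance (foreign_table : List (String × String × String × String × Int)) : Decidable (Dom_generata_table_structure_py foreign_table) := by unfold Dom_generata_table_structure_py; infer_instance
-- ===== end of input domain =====

-- B replaces A's stateful loop (counter/string accumulator/mutated dict with early return) by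
-- cutoff-index-first slicing plus ','.join — a simpler decomposition, same O(n) cost.


-- ===== PORT A =====
-- the `for … else` loop of A; string concatenation is ported over List Char (exact on this
-- domain; Lean's own String.append is kernel-opaque), the dict is PySem.Dict.
def generata_table_structure_py_loop :
    List (String × String × String × String × Int) → Int → List Char →
    PySem.Dict String String → PySem.Dict String String
  | [], _, column_data, d =>
      -- `else:` clause of the for-loop: column_data.strip(','), set key, return
      d.insert "column_data" (String.mk (PySem.Chars.stripChars column_data [',']))
  | (ftn, sch, cn, ct, o) :: rest, counter, column_data, d =>
      if o = 1 ∧ 0 < counter then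
        d.insert "column_data" (String.mk (PySem.Chars.stripChars column_data [',']))
      else
        generata_table_structure_py_loop rest (counter + 1)
          (column_data ++ cn.toList ++ ' ' :: ct.toList ++ [','])
          ((d.insert "foreign_table_name" ftn).insert "schema_name" sch)

def generata_table_structure_py (foreign_table : List (String × String × String × String × Int)) : List (String × String) :=
  (generata_table_structure_py_loop foreign_table 0 [] PySem.Dict.empty).items

-- ===== PORT B =====
-- next((i for i, r in enumerate(rows) if i > 0 and r[4] == 1), len(rows))
def generata_table_structure_py_alt_cutoff :
    List (String × String × String × String × Int) → Nat → Nat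
  | [], i => i
  | r :: rest, i => if 0 < i ∧ r.2.2.2.2 = 1 then i else generata_table_structure_py_alt_cutoff rest (i + 1)

def generata_table_structure_py_alt (foreign_table : List (String × String × String × String × Int)) : List (String × String) :=
  let cutoff := generata_table_structure_py_alt_cutoff foreign_table 0
  let group := PySem.List.slice foreign_table none (some (cutoff : Int))
  match group.getLast? with
  | none => [("column_data", "")]
  | some last =>
      [("foreign_table_name", last.1), ("schema_name", last.2.1),
       ("column_data", String.mk (PySem.Chars.stripChars
         (PySem.Chars.join [','] (group.map (fun r => r.2.2.1.toList ++ ' ' :: r.2.2.2.1.toList))) [',']))]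

-- ===== PRECONDITION & SPEC =====
def Spec_generata_table_structure_py (foreign_table : List (String × String × String × String × Int)) (out : List (String × String)) : Prop := out = generata_table_structure_py_alt foreign_table
instance (foreign_table : List (String × String × String × String × Int)) (out : List (String × String)) : Decidable (Spec_generata_table_structure_py foreign_table out) := by unfold Spec_generata_table_structure_py; infer_instance

-- ===== CLAIM (what is proved, stated in full; the proofs are below) =====
def Claim_equal_generata_table_structure_py : Prop := ∀ (foreign_table : List (String × String × String × String × Int)), Dom_generata_table_structure_py foreign_table → Spec_generata_table_structure_py foreign_table (generata_table_structure_py foreign_table)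

-- ===== LEMMAS AND PROOFS =====

-- abbreviations used only by the proofs
def pvQ (r : String × String × String × String × Int) : Bool := r.2.2.2.2 != 1
def pvPieceN (r : String × String × String × String × Int) : List Char :=
  r.2.2.1.toList ++ ' ' :: r.2.2.2.1.toList
def pvPieceC (r : String × String × String × String × Int) : List Char := pvPieceN r ++ [',']

theorem pv_cutoff_eq : ∀ (l : List (String × String × String × String × Int)) (j : Nat), 0 < j →
    generata_table_structure_py_alt_cutoff l j = j + (l.takeWhile pvQ).length := by
  intro l
  induction l with
  | nil => intro j hj; simp [generata_table_structure_py_alt_cutoff]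
  | cons r rest ih =>
      intro j hj
      by_cases h : r.2.2.2.2 = 1
      · have hq : pvQ r = false := by simp [pvQ, h]
        rw [List.takeWhile_cons, hq]
        simp [generata_table_structure_py_alt_cutoff, hj, h]
      · have hq : pvQ r = true := by simp [pvQ, h]
        rw [List.takeWhile_cons, hq]
        simp only [generata_table_structure_py_alt_cutoff, h, and_false, if_false]
        rw [ih (j + 1) (by omega)]
        simp
        omega

theorem pv_take_takeWhile (l : List (String × String × String × String × Int)) :
    l.take ((l.takeWhile pvQ).length) = l.takeWhile pvQ := by
  have h := List.takeWhile_prefix (l := l) (p := pvQ)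
  exact (List.prefix_iff_eq_take.mp h).symm

theorem pv_strip_trailing (ys : List Char) :
    PySem.Chars.stripChars (ys ++ [',']) [','] = PySem.Chars.stripChars ys [','] := by
  simp only [PySem.Chars.stripChars]
  rw [List.dropWhile_append]
  by_cases h : (ys.dropWhile fun c => [','].contains c) = []
  · rw [if_pos (by simpa [List.dropWhile_eq_nil_iff] using h), h]
    simp [List.dropWhile]
  · rw [if_neg (by simpa using h), List.reverse_append]
    simp [List.dropWhile]

theorem pv_flat_join : ∀ (g : List (String × String × String × String × Int)), g ≠ [] →
    g.flatMap pvPieceC = PySem.Chars.join [','] (g.map pvPieceN) ++ [','] := by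
  intro g
  induction g with
  | nil => intro h; exact absurd rfl h
  | cons r rest ih =>
      intro _
      cases rest with
      | nil => simp [pvPieceC, PySem.Chars.join, List.intercalate]
      | cons s t =>
          rw [List.flatMap_cons, ih (by simp)]
          simp only [List.map_cons]
          rw [PySem.Chars.join_cons_cons]
          simp [pvPieceC]

theorem pv_dict_init (x y : String) :
    (PySem.Dict.empty.insert "foreign_table_name" x).insert "schema_name" y
      = PySem.Dict.mk [("foreign_table_name", x), ("schema_name", y)] := by
  rfl

theorem pv_dict_step (a b x y : String) :
    ((PySem.Dict.mk [("foreign_table_name", a), ("schema_name", b)]).insert "foreign_table_name" x).insert "schema_name" y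
      = PySem.Dict.mk [("foreign_table_name", x), ("schema_name", y)] := by
  rfl

theorem pv_dict_add (x y v : String) :
    (PySem.Dict.mk [("foreign_table_name", x), ("schema_name", y)]).insert "column_data" v
      = PySem.Dict.mk [("foreign_table_name", x), ("schema_name", y), ("column_data", v)] := by
  rfl

theorem pv_fold_two : ∀ (g : List (String × String × String × String × Int)) (a b : String),
    g.foldl (fun d r => (d.insert "foreign_table_name" r.1).insert "schema_name" r.2.1)
      (PySem.Dict.mk [("foreign_table_name", a), ("schema_name", b)])
    = PySem.Dict.mk [("foreign_table_name", g.foldl (fun _ r => r.1) a),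
        ("schema_name", g.foldl (fun _ r => r.2.1) b)] := by
  intro g
  induction g with
  | nil => intro a b; rfl
  | cons r rest ih =>
      intro a b
      rw [List.foldl_cons, pv_dict_step, ih]
      rfl

theorem pv_getLast?_foldl : ∀ {α : Type} (g : List α) (r : α),
    (r :: g).getLast? = some (g.foldl (fun _ s => s) r) := by
  intro α g
  induction g with
  | nil => intro r; rfl
  | cons s t ih =>
      intro r
      rw [List.getLast?_cons_cons, ih s, List.foldl_cons]

theorem pv_foldl_comp : ∀ {α β : Type} (g : List α) (r : α) (f : α → β),
    g.foldl (fun _ s => f s) (f r) = f (g.foldl (fun _ s => s) r) := by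
  intro α β g
  induction g with
  | nil => intro r f; rfl
  | cons s t ih => intro r f; simpa using ih s f

-- core invariant of A's loop (counter already positive)
theorem pv_loop_eq : ∀ (rows : List (String × String × String × String × Int)) (n : Int)
    (cd : List Char) (d : PySem.Dict String String), 0 < n →
    generata_table_structure_py_loop rows n cd d =
      ((rows.takeWhile pvQ).foldl
            (fun d r => (d.insert "foreign_table_name" r.1).insert "schema_name" r.2.1) d).insert
        "column_data"
        (String.mk (PySem.Chars.stripChars (cd ++ (rows.takeWhile pvQ).flatMap pvPieceC) [','])) := by
  intro rows
  induction rows with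
  | nil => intro n cd d hn; simp [generata_table_structure_py_loop]
  | cons r rest ih =>
      intro n cd d hn
      obtain ⟨ftn, sch, cn, ct, o⟩ := r
      by_cases h : o = 1
      · have hq : pvQ (ftn, sch, cn, ct, o) = false := by simp [pvQ, h]
        rw [List.takeWhile_cons, hq]
        simp [generata_table_structure_py_loop, h, hn]
      · have hq : pvQ (ftn, sch, cn, ct, o) = true := by simp [pvQ, h]
        rw [List.takeWhile_cons, hq]
        simp only [generata_table_structure_py_loop, h, false_and, if_false]
        rw [ih (n + 1) _ _ (by omega)]
        simp [pvPieceC, pvPieceN, List.flatMap_cons]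

theorem generata_table_structure_py_spec' :
    ∀ (foreign_table : List (String × String × String × String × Int)),
    generata_table_structure_py foreign_table = generata_table_structure_py_alt foreign_table := by
  intro ft
  cases ft with
  | nil => rfl
  | cons r rest =>
      obtain ⟨ftn, sch, cn, ct, o⟩ := r
      set g := rest.takeWhile pvQ with hg
      -- A side
      simp only [generata_table_structure_py, generata_table_structure_py_loop]
      rw [if_neg (by simp), pv_dict_init]
      simp only [List.nil_append, zero_add]
      rw [pv_loop_eq rest 1 _ _ (by omega), pv_fold_two, ← hg, pv_dict_add]
      -- B side
      have hcut : generata_table_structure_py_alt_cutoff ((ftn, sch, cn, ct, o) :: rest) 0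
          = 1 + g.length := by
        simp only [generata_table_structure_py_alt_cutoff]
        rw [if_neg (by simp), pv_cutoff_eq rest 1 (by omega), ← hg]
      have hgroup : PySem.List.slice ((ftn, sch, cn, ct, o) :: rest) none
          (some ((generata_table_structure_py_alt_cutoff ((ftn, sch, cn, ct, o) :: rest) 0 : Nat) : Int))
          = (ftn, sch, cn, ct, o) :: g := by
        rw [hcut, PySem.List.slice_to_natCast, Nat.add_comm, List.take_succ_cons, hg,
          pv_take_takeWhile]
      simp only [generata_table_structure_py_alt]
      rw [hgroup, pv_getLast?_foldl]
      have hfun : (fun (r : String × String × String × String × Int) =>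
          r.2.2.1.toList ++ ' ' :: r.2.2.2.1.toList) = pvPieceN := rfl
      rw [hfun]
      -- align the three components
      have h1 : g.foldl (fun _ r => r.1) ftn
          = (g.foldl (fun _ s => s) (ftn, sch, cn, ct, o)).1 :=
        pv_foldl_comp g (ftn, sch, cn, ct, o) (fun s => s.1)
      have h2 : g.foldl (fun _ r => r.2.1) sch
          = (g.foldl (fun _ s => s) (ftn, sch, cn, ct, o)).2.1 :=
        pv_foldl_comp g (ftn, sch, cn, ct, o) (fun s => s.2.1)
      have h3 : (cn.toList ++ ' ' :: ct.toList ++ [',']) ++ g.flatMap pvPieceC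
          = PySem.Chars.join [','] (((ftn, sch, cn, ct, o) :: g).map pvPieceN) ++ [','] := by
        have : (cn.toList ++ ' ' :: ct.toList ++ [',']) ++ g.flatMap pvPieceC
            = ((ftn, sch, cn, ct, o) :: g).flatMap pvPieceC := by
          rw [List.flatMap_cons]
          simp [pvPieceC, pvPieceN]
        rw [this, pv_flat_join _ (by simp)]
      simp only [PySem.Dict.items]
      rw [h1, h2, h3, pv_strip_trailing]

-- ===== VERDICT (by name: the statement is the Claim_ definition above) =====
theorem generata_table_structure_py_spec : Claim_equal_generata_table_structure_py := by
  intro ft _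
  show generata_table_structure_py ft = generata_table_structure_py_alt ft
  exact generata_table_structure_py_spec' ft
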